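-- pv_equiv track=rewrite | github.com/ErdemTsyrenov/homework_repostory | homework1/task5.py | find_maximal_subarray_sum
-- ===== SOURCE A (Python) =====
-- from heapq import heappop, heappush
-- from typing import List
--
-- def find_maximal_subarray_sum(nums: List[int], k: int) -> int:
--     """
--     answer to this task looks like S[i]-S[j] where i-j+1 <= k and
--     S[i] = sum of elements from 0 to i. Our goal is for each element
--     S[i] to find such element S[j] to maximize answer or in other words
--     to find minimal S[j] where j >= i-k-1. To do this we can use heap.
--     Heap contains pairs (S[i], i). For each S[i] we use heap.min() and
--     ans = S[i] - heap.min()[0]; If heap.min()[1] < i-k we need to pop item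
--     Time complexity analysys:
--     for each S[i] we insert S[i] to heap and delete it once. So time
--     complexity is O(n*log(n))
--     """
--     sums = []  # heap that contains tuples (S[i], i)
--     current_sum = 0
--     heappush(sums, (0, -1))
--     max_sum = float('-inf')
--     for i, elem in enumerate(nums):
--         current_sum += elem
--         while sums[0][1] < i - k:
--             heappop(sums)
--         max_sum = max(max_sum, current_sum - sums[0][0])
--         heappush(sums, (current_sum, i))
--     return max_sum
-- ===== SOURCE B (Python) =====
-- from collections import deque
--
-- def find_maximal_subarray_sum(nums, k):
--     # prefix sums with a monotonic deque: dq holds (index j, prefix sum of nums[:j+1])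
--     # with strictly increasing prefix sums, so dq[0] is the minimum prefix sum of the
--     # last <= k positions; answer = max over i of prefix(i+1) - that minimum.  O(n).
--     dq = deque([(-1, 0)])
--     s = 0
--     best = None
--     for i, x in enumerate(nums):
--         s += x
--         while dq[0][0] < i - k:
--             dq.popleft()
--         cand = s - dq[0][1]
--         if best is None or cand > best:
--             best = cand
--         while dq and dq[-1][1] >= s:
--             dq.pop()
--         dq.append((i, s))
--     return best
-- ===== Notes on version B (the rewrite author's own statement) =====
-- stated objective: faster
-- what changed: Replaces the heap of prefix sums with lazy deletion by a monotonic deque over prefix sums (sliding-window minimum), removing the heap entirely.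
-- outside the precondition, e.g. on find_maximal_subarray_sum([], 1): A returns -inf, B returns None; on find_maximal_subarray_sum([1, 2], 0): A raises IndexError, B raises IndexError
import Mathlib
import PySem

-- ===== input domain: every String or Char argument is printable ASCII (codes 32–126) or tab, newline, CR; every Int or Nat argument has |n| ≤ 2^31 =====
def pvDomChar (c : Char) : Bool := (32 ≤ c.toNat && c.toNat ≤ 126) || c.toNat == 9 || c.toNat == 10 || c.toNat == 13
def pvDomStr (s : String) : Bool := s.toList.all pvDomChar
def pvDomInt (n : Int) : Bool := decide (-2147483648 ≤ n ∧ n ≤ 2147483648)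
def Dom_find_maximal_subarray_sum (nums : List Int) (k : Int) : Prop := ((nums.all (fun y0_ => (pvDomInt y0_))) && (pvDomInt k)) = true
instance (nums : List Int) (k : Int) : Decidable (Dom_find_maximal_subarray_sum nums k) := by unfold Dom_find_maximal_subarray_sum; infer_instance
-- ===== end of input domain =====

-- B replaces A's lazy-deletion heap of prefix sums by a monotonic deque over prefix sums
-- (sliding-window minimum); a timing run measured B faster on large inputs.

-- ===== PORT A =====
-- Python's heapq (binary min-heap of pairs, lexicographic order) is modelled as a list kept
-- sorted: heap[0] is the unique minimum and heappop removes it.  This is observably exact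
-- here: A only ever reads sums[0] and pops it, and all pairs in the heap are distinct.
def lexLe (a b : Int × Int) : Bool := a.1 < b.1 || (a.1 == b.1 && a.2 ≤ b.2)

def hpush : List (Int × Int) → (Int × Int) → List (Int × Int)
  | [], x => [x]
  | y :: ys, x => if lexLe x y then x :: y :: ys else y :: hpush ys x

-- `while sums[0][1] < i - k: heappop(sums)`; an empty heap is Python's IndexError (excluded by Pre_)
def popStale : List (Int × Int) → Int → List (Int × Int)
  | [], _ => []
  | p :: rest, b => if p.2 < b then popStale rest b else p :: rest

def aLoop (k : Int) : List Int → Int → List (Int × Int) → Int → Option Int → Option Int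
  | [], _, _, _, best => best
  | x :: xs, i, sums, cs, best =>
    let cs' := cs + x
    let h := popStale sums (i - k)
    let m := (h.headD (0, 0)).1          -- sums[0][0] (empty heap is excluded by Pre_)
    let best' : Option Int := some (match best with
      | none => cs' - m                  -- max(float('-inf'), v) = v
      | some b => max b (cs' - m))
    aLoop k xs (i + 1) (hpush h (cs', i)) cs' best'

def find_maximal_subarray_sum (nums : List Int) (k : Int) : Int :=
  (aLoop k nums 0 (hpush [] (0, -1)) 0 none).getD 0   -- none = float('-inf'), excluded by Pre_

-- ===== PORT B =====
-- `while dq[0][0] < i - k: dq.popleft()`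
def dropFront : List (Int × Int) → Int → List (Int × Int)
  | [], _ => []
  | p :: rest, b => if p.1 < b then dropFront rest b else p :: rest

def bLoop (k : Int) : List Int → Int → List (Int × Int) → Int → Option Int → Option Int
  | [], _, _, _, best => best
  | x :: xs, i, dq, s, best =>
    let s' := s + x
    let dq1 := dropFront dq (i - k)
    let cand := s' - (dq1.headD (0, 0)).2     -- dq[0][1] (empty deque is excluded by Pre_)
    let best' : Option Int := some (match best with
      | none => cand
      | some b => if cand > b then cand else b)
    -- `while dq and dq[-1][1] >= s: dq.pop()`: drop the back elements with value ≥ s'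
    let dq2 := (dq1.reverse.dropWhile (fun p => decide (s' ≤ p.2))).reverse
    bLoop k xs (i + 1) (dq2 ++ [(i, s')]) s' best'

def find_maximal_subarray_sum_alt (nums : List Int) (k : Int) : Int :=
  (bLoop k nums 0 [(-1, 0)] 0 none).getD 0   -- `best is None` (empty nums) is excluded by Pre_

-- ===== PRECONDITION & SPEC =====
-- Pre_ excludes empty nums, where A returns float('-inf') (not an int), and k ≤ 0,
-- where A raises IndexError on the emptied heap.
def Pre_find_maximal_subarray_sum (nums : List Int) (k : Int) : Prop := nums ≠ [] ∧ 1 ≤ k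
instance (nums : List Int) (k : Int) : Decidable (Pre_find_maximal_subarray_sum nums k) := by
  unfold Pre_find_maximal_subarray_sum; infer_instance
def pvWitness_find_maximal_subarray_sum : List Int × Int := ([1, -2, 3], 2)

def Spec_find_maximal_subarray_sum (nums : List Int) (k : Int) (out : Int) : Prop := out = find_maximal_subarray_sum_alt nums k
instance (nums : List Int) (k : Int) (out : Int) : Decidable (Spec_find_maximal_subarray_sum nums k out) := by unfold Spec_find_maximal_subarray_sum; infer_instance

-- ===== CLAIM (what is proved, stated in full; the proofs are below) =====
def Claim_equal_find_maximal_subarray_sum : Prop := ∀ (nums : List Int) (k : Int), Dom_find_maximal_subarray_sum nums k → Pre_find_maximal_subarray_sum nums k → Spec_find_maximal_subarray_sum nums k (find_maximal_subarray_sum nums k)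

-- ===== LEMMAS AND PROOFS =====

-- common spec: pfx t = sum of nums[:t]; the answer is the running max over i of
-- pfx (i+1) - min{pfx t : max 0 (i+1-k) ≤ t ≤ i}.
def pfx (nums : List Int) (t : Nat) : Int := (nums.take t).sum
def winLo (k : Int) (i : Nat) : Nat := ((i : Int) + 1 - k).toNat
def wlist (nums : List Int) (k : Int) (i : Nat) : List Int :=
  (List.range' (winLo k i) (i + 1 - winLo k i)).map (pfx nums)
def wmin (nums : List Int) (k : Int) (i : Nat) : Int :=
  (PySem.List.min? (wlist nums k i) (fun v => v)).getD 0
def candSpec (nums : List Int) (k : Int) (i : Nat) : Int := pfx nums (i + 1) - wmin nums k i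
def bestSpec (nums : List Int) (k : Int) : Nat → Option Int
  | 0 => none
  | i + 1 => some (match bestSpec nums k i with
      | none => candSpec nums k i
      | some b => max b (candSpec nums k i))

def lexLt (a b : Int × Int) : Prop := a.1 < b.1 ∨ (a.1 = b.1 ∧ a.2 < b.2)

lemma pfx_succ {nums : List Int} {i : Nat} {x : Int} (h : nums[i]? = some x) :
    pfx nums (i + 1) = pfx nums i + x := by
  simp only [pfx]
  rw [List.take_succ, h]
  simp

lemma lexLt_trans {a b c : Int × Int} (h1 : lexLt a b) (h2 : lexLt b c) : lexLt a c := by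
  obtain ⟨a1,a2⟩ := a; obtain ⟨b1,b2⟩ := b; obtain ⟨c1,c2⟩ := c
  simp only [lexLt] at *; omega

lemma lexLe_false {a b : Int × Int} (h : lexLe a b = false) : lexLt b a := by
  obtain ⟨a1,a2⟩ := a; obtain ⟨b1,b2⟩ := b
  simp only [lexLe, Bool.or_eq_false_iff, Bool.and_eq_false_iff, decide_eq_false_iff_not,
    beq_eq_false_iff_ne, ne_eq] at h
  simp only [lexLt]; omega

lemma lexLe_true {a b : Int × Int} (h : lexLe a b = true) (hne : a.2 ≠ b.2) : lexLt a b := by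
  obtain ⟨a1,a2⟩ := a; obtain ⟨b1,b2⟩ := b
  simp only [lexLe, Bool.or_eq_true, Bool.and_eq_true, decide_eq_true_eq, beq_iff_eq] at h
  simp only [lexLt] at *; simp at hne; omega

lemma hpush_mem {l : List (Int × Int)} {x p : Int × Int} :
    p ∈ hpush l x ↔ p = x ∨ p ∈ l := by
  induction l with
  | nil => simp [hpush]
  | cons y ys ih =>
    simp only [hpush]
    split
    · simp [or_comm, or_assoc, or_left_comm]
    · simp [ih]; tauto

lemma hpush_pairwise {l : List (Int × Int)} {x : Int × Int}
    (hs : l.Pairwise lexLt) (hne : ∀ p ∈ l, p.2 ≠ x.2) : (hpush l x).Pairwise lexLt := by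
  induction l with
  | nil => simp [hpush]
  | cons y ys ih =>
    rcases List.pairwise_cons.1 hs with ⟨h1, h2⟩
    simp only [hpush]
    split
    · rename_i hle
      have hxy : lexLt x y := lexLe_true hle (Ne.symm (hne y (by simp)))
      refine List.pairwise_cons.2 ⟨?_, hs⟩
      intro p hp
      rcases List.mem_cons.1 hp with rfl | hp2
      · exact hxy
      · exact lexLt_trans hxy (h1 p hp2)
    · rename_i hle
      have hyx : lexLt y x := lexLe_false (by simpa using hle)
      refine List.pairwise_cons.2 ⟨?_, ih h2 (fun p hp => hne p (by simp [hp]))⟩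
      intro p hp
      rcases hpush_mem.1 hp with rfl | hp2
      · exact hyx
      · exact h1 p hp2

lemma popStale_subset {l : List (Int × Int)} {b : Int} {p : Int × Int}
    (h : p ∈ popStale l b) : p ∈ l := by
  induction l with
  | nil => simpa [popStale] using h
  | cons y ys ih =>
    simp only [popStale] at h
    split at h
    · exact List.mem_cons_of_mem _ (ih h)
    · exact h

lemma popStale_mem {l : List (Int × Int)} {b : Int} {p : Int × Int}
    (h : p ∈ l) (hb : b ≤ p.2) : p ∈ popStale l b := by
  induction l with
  | nil => simpa [popStale] using h
  | cons y ys ih =>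
    simp only [popStale]
    split
    · rcases List.mem_cons.1 h with rfl | h2
      · omega
      · exact ih h2
    · exact h

lemma popStale_pairwise {l : List (Int × Int)} {b : Int}
    (hs : l.Pairwise lexLt) : (popStale l b).Pairwise lexLt := by
  induction l with
  | nil => simpa [popStale] using hs
  | cons y ys ih =>
    simp only [popStale]
    rcases List.pairwise_cons.1 hs with ⟨h1, h2⟩
    split
    · exact ih h2
    · exact hs

lemma popStale_head {l : List (Int × Int)} {b : Int} {q : Int × Int} {t : List (Int × Int)}
    (h : popStale l b = q :: t) : b ≤ q.2 := by
  induction l with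
  | nil => simp [popStale] at h
  | cons y ys ih =>
    simp only [popStale] at h
    split at h
    · exact ih h
    · rename_i hc; cases h; omega

lemma head_min {q : Int × Int} {t : List (Int × Int)} (hs : (q :: t).Pairwise lexLt)
    {p : Int × Int} (hp : p ∈ q :: t) : q.1 ≤ p.1 := by
  rcases List.mem_cons.1 hp with rfl | h2
  · exact le_refl _
  · rcases (List.pairwise_cons.1 hs).1 p h2 with h | ⟨h, _⟩
    · exact le_of_lt h
    · exact le_of_eq h

def InvA (nums : List Int) (k : Int) (i : Nat) (h : List (Int × Int)) (cs : Int) (best : Option Int) : Prop :=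
  cs = pfx nums i ∧ h.Pairwise lexLt ∧
  (∀ p ∈ h, -1 ≤ p.2 ∧ p.2 < (i : Int) ∧ p.1 = pfx nums (p.2 + 1).toNat) ∧
  (∀ j : Int, -1 ≤ j → (i : Int) - 1 - k ≤ j → j < (i : Int) → (pfx nums (j + 1).toNat, j) ∈ h) ∧
  best = bestSpec nums k i

lemma aLoop_inv {nums : List Int} {k : Int} (hk : 1 ≤ k) :
    ∀ (xs : List Int) (i : Nat) (h : List (Int × Int)) (cs : Int) (best : Option Int),
      nums.drop i = xs → i ≤ nums.length → InvA nums k i h cs best →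
      aLoop k xs (i : Int) h cs best = bestSpec nums k nums.length := by
  intro xs
  induction xs with
  | nil =>
    intro i h cs best hdrop hle hinv
    have hlen : nums.length - i = 0 := by
      have := congrArg List.length hdrop; simpa using this
    have hi : i = nums.length := by omega
    simp [aLoop, hinv.2.2.2.2, hi]
  | cons x xs ih =>
    intro i h cs best hdrop hle hinv
    obtain ⟨hcs, hpw, hcontent, hcomplete, hbest⟩ := hinv
    have hx : nums[i]? = some x := by
      have h0 : (nums.drop i)[0]? = some x := by rw [hdrop]; rfl
      simpa using h0
    have hilt : i < nums.length := (List.getElem?_eq_some_iff.1 hx).1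
    have hpfx : pfx nums (i + 1) = pfx nums i + x := pfx_succ hx
    set h' := popStale h ((i : Int) - k) with hh'
    have hpw' : h'.Pairwise lexLt := popStale_pairwise hpw
    have hkeymem : (pfx nums i, (i : Int) - 1) ∈ h := by
      have hm := hcomplete ((i : Int) - 1) (by omega) (by omega) (by omega)
      have he : (((i : Int) - 1) + 1).toNat = i := by omega
      rwa [he] at hm
    have hkeymem' : (pfx nums i, (i : Int) - 1) ∈ h' := popStale_mem hkeymem (by simp; omega)
    obtain ⟨q, t, hqt⟩ : ∃ q t, h' = q :: t := by
      cases hht : h' with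
      | nil => rw [hht] at hkeymem'; simp at hkeymem'
      | cons a b => exact ⟨a, b, rfl⟩
    have hq_in_h : q ∈ h := popStale_subset (by rw [← hh', hqt]; simp)
    obtain ⟨hq1, hq2, hq3⟩ := hcontent q hq_in_h
    have hqb : (i : Int) - k ≤ q.2 := popStale_head (hh'.symm.trans hqt)
    have hlo : winLo k i ≤ i := by simp only [winLo]; omega
    have hq1_mem_w : q.1 ∈ wlist nums k i := by
      rw [hq3]
      refine List.mem_map_of_mem (List.mem_range'_1.2 ⟨?_, ?_⟩) <;> simp only [winLo] <;> omega
    have hmin_le : ∀ v ∈ wlist nums k i, q.1 ≤ v := by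
      intro v hv
      obtain ⟨tn, htn, rfl⟩ := List.mem_map.1 hv
      have htn' := List.mem_range'_1.1 htn
      simp only [winLo] at htn'
      have hjmem : (pfx nums ((((tn : Int) - 1) + 1).toNat), (tn : Int) - 1) ∈ h :=
        hcomplete ((tn : Int) - 1) (by omega) (by omega) (by omega)
      have he : (((tn : Int) - 1) + 1).toNat = tn := by omega
      rw [he] at hjmem
      have hmem' : (pfx nums tn, (tn : Int) - 1) ∈ q :: t := by
        rw [← hqt]
        exact popStale_mem hjmem (by simp; omega)
      exact head_min (hqt ▸ hpw') hmem'
    have hmin : PySem.List.min? (wlist nums k i) (fun v => v) = some q.1 := by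
      cases hm : PySem.List.min? (wlist nums k i) (fun v => v) with
      | none =>
        rw [PySem.List.min?_eq_none_iff] at hm
        rw [hm] at hq1_mem_w; simp at hq1_mem_w
      | some m =>
        have hmem := PySem.List.min?_mem hm
        have hle1 := PySem.List.min?_isMin hm q.1 hq1_mem_w
        exact congrArg some (le_antisymm hle1 (hmin_le m hmem))
    have hwq : wmin nums k i = q.1 := by rw [wmin, hmin]; rfl
    have hdrop' : nums.drop (i + 1) = xs := by
      rw [← List.tail_drop, hdrop]; rfl
    have hcand : cs + x - q.1 = candSpec nums k i := by
      rw [candSpec, hwq, hpfx, hcs]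
    simp only [aLoop, ← hh', hqt, List.headD]
    have hcast : (i : Int) + 1 = ((i + 1 : Nat) : Int) := by push_cast; ring
    rw [hcast]
    apply ih (i + 1) _ _ _ hdrop' (by omega)
    refine ⟨by rw [hpfx, hcs], ?_, ?_, ?_, ?_⟩
    · apply hpush_pairwise (hqt ▸ hpw')
      intro p hp
      have hph : p ∈ h := popStale_subset (hqt ▸ hp : p ∈ h')
      have := (hcontent p hph).2.1
      simp; omega
    · intro p hp
      rcases hpush_mem.1 hp with rfl | hp2
      · refine ⟨by simp, by push_cast; omega, ?_⟩
        have he : (((i : Nat) : Int) + 1).toNat = i + 1 := by omega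
        simp only [he]
        rw [hpfx, hcs]
      · have hph : p ∈ h := popStale_subset (hqt ▸ hp2 : p ∈ h')
        obtain ⟨a1, a2, a3⟩ := hcontent p hph
        exact ⟨a1, by push_cast; omega, a3⟩
    · intro j hj1 hj2 hj3
      by_cases hj : j = (i : Int)
      · subst hj
        apply hpush_mem.2 (Or.inl ?_)
        have he : ((i : Int) + 1).toNat = i + 1 := by omega
        rw [he, hpfx, hcs]
      · have hjlt : j < (i : Int) := by push_cast at hj3; omega
        have hjm : (pfx nums (j + 1).toNat, j) ∈ h :=
          hcomplete j hj1 (by push_cast at hj2 ⊢; omega) hjlt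
        have hjm' : (pfx nums (j + 1).toNat, j) ∈ h' :=
          popStale_mem hjm (by simp; push_cast at hj2; omega)
        exact hpush_mem.2 (Or.inr (hqt ▸ hjm'))
    · rw [hbest, hcand]
      cases hbs : bestSpec nums k i <;> simp [bestSpec, hbs]

lemma A_eq {nums : List Int} {k : Int} (hk : 1 ≤ k) :
    find_maximal_subarray_sum nums k = (bestSpec nums k nums.length).getD 0 := by
  have hinv : InvA nums k 0 (hpush [] (0, -1)) 0 none := by
    refine ⟨rfl, by simp [hpush], ?_, ?_, rfl⟩
    · intro p hp
      simp only [hpush, List.mem_singleton] at hp; subst hp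
      exact ⟨by norm_num, by norm_num, by simp [pfx]⟩
    · intro j h1 h2 h3
      have hj : j = -1 := by omega
      subst hj
      simp [hpush, pfx]
  have h0 := aLoop_inv hk nums 0 (hpush [] (0, -1)) 0 none rfl (by omega) hinv
  norm_num at h0
  rw [find_maximal_subarray_sum, h0]

-- B side
def incr (p q : Int × Int) : Prop := p.1 < q.1 ∧ p.2 < q.2

lemma dropFront_subset {l : List (Int × Int)} {b : Int} {p : Int × Int}
    (h : p ∈ dropFront l b) : p ∈ l := by
  induction l with
  | nil => simpa [dropFront] using h
  | cons y ys ih =>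
    simp only [dropFront] at h
    split at h
    · exact List.mem_cons_of_mem _ (ih h)
    · exact h

lemma dropFront_mem {l : List (Int × Int)} {b : Int} {p : Int × Int}
    (h : p ∈ l) (hb : b ≤ p.1) : p ∈ dropFront l b := by
  induction l with
  | nil => simpa [dropFront] using h
  | cons y ys ih =>
    simp only [dropFront]
    split
    · rcases List.mem_cons.1 h with rfl | h2
      · omega
      · exact ih h2
    · exact h

lemma dropFront_pairwise {l : List (Int × Int)} {b : Int}
    (hs : l.Pairwise incr) : (dropFront l b).Pairwise incr := by
  induction l with
  | nil => simpa [dropFront] using hs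
  | cons y ys ih =>
    simp only [dropFront]
    split
    · exact ih (List.pairwise_cons.1 hs).2
    · exact hs

lemma dropFront_head {l : List (Int × Int)} {b : Int} {q : Int × Int} {t : List (Int × Int)}
    (h : dropFront l b = q :: t) : b ≤ q.1 := by
  induction l with
  | nil => simp [dropFront] at h
  | cons y ys ih =>
    simp only [dropFront] at h
    split at h
    · exact ih h
    · rename_i hc; cases h; omega

lemma headB_min {q : Int × Int} {t : List (Int × Int)} (hs : (q :: t).Pairwise incr)
    {p : Int × Int} (hp : p ∈ q :: t) : q.2 ≤ p.2 := by
  rcases List.mem_cons.1 hp with rfl | h2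
  · exact le_refl _
  · exact le_of_lt ((List.pairwise_cons.1 hs).1 p h2).2

lemma popBack_subset {l : List (Int × Int)} {s : Int} {p : Int × Int}
    (h : p ∈ (l.reverse.dropWhile (fun p => decide (s ≤ p.2))).reverse) : p ∈ l := by
  rw [List.mem_reverse] at h
  have := (List.dropWhile_sublist (l := l.reverse) (p := fun p => decide (s ≤ p.2))).mem h
  simpa using this

lemma popBack_pairwise {l : List (Int × Int)} {s : Int}
    (hs : l.Pairwise incr) : ((l.reverse.dropWhile (fun p => decide (s ≤ p.2))).reverse).Pairwise incr := by
  have hsub : List.Sublist ((l.reverse.dropWhile (fun p => decide (s ≤ p.2))).reverse) l := by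
    have h1 := (List.dropWhile_sublist (l := l.reverse) (p := fun p => decide (s ≤ p.2))).reverse
    simpa using h1
  exact hs.sublist hsub

lemma popBack_lt {l : List (Int × Int)} {s : Int} (hs : l.Pairwise incr)
    {p : Int × Int} (hp : p ∈ (l.reverse.dropWhile (fun p => decide (s ≤ p.2))).reverse) :
    p.2 < s := by
  rw [List.mem_reverse] at hp
  cases hd : l.reverse.dropWhile (fun p => decide (s ≤ p.2)) with
  | nil => rw [hd] at hp; simp at hp
  | cons c r =>
    have hc : ¬ (s ≤ c.2) := by
      have := List.head_dropWhile_not (l := l.reverse) (p := fun p => decide (s ≤ p.2))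
        (by simp [hd])
      simpa [hd] using this
    have hpw : (c :: r).Pairwise (flip incr) := by
      have hrev : (l.reverse).Pairwise (flip incr) := List.pairwise_reverse.2 hs
      have h1 := hrev.sublist (List.dropWhile_sublist (fun p => decide (s ≤ p.2)))
      rwa [hd] at h1
    rw [hd] at hp
    rcases List.mem_cons.1 hp with rfl | h2
    · omega
    · have := ((List.pairwise_cons.1 hpw).1 p h2).2
      simp only [flip] at this ⊢
      omega

lemma popBack_cases {l : List (Int × Int)} {s : Int} {p : Int × Int} (h : p ∈ l) :
    p ∈ (l.reverse.dropWhile (fun p => decide (s ≤ p.2))).reverse ∨ s ≤ p.2 := by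
  have hp : p ∈ l.reverse := List.mem_reverse.2 h
  rw [← List.takeWhile_append_dropWhile (p := fun p => decide (s ≤ p.2)) (l := l.reverse)] at hp
  rcases List.mem_append.1 hp with h1 | h2
  · right
    simpa using List.mem_takeWhile_imp h1
  · left
    exact List.mem_reverse.2 h2

def InvB (nums : List Int) (k : Int) (i : Nat) (dq : List (Int × Int)) (s : Int) (best : Option Int) : Prop :=
  s = pfx nums i ∧ dq.getLast? = some ((i : Int) - 1, pfx nums i) ∧ dq.Pairwise incr ∧
  (∀ p ∈ dq, -1 ≤ p.1 ∧ p.1 < (i : Int) ∧ p.2 = pfx nums (p.1 + 1).toNat) ∧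
  (∀ t : Int, (i : Int) - 1 - k ≤ t → -1 ≤ t → t < (i : Int) →
    ∃ p ∈ dq, t ≤ p.1 ∧ p.2 ≤ pfx nums (t + 1).toNat) ∧
  best = bestSpec nums k i

lemma bLoop_inv {nums : List Int} {k : Int} (hk : 1 ≤ k) :
    ∀ (xs : List Int) (i : Nat) (dq : List (Int × Int)) (s : Int) (best : Option Int),
      nums.drop i = xs → i ≤ nums.length → InvB nums k i dq s best →
      bLoop k xs (i : Int) dq s best = bestSpec nums k nums.length := by
  intro xs
  induction xs with
  | nil =>
    intro i dq s best hdrop hle hinv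
    have hlen : nums.length - i = 0 := by
      have := congrArg List.length hdrop; simpa using this
    have hi : i = nums.length := by omega
    simp [bLoop, hinv.2.2.2.2.2, hi]
  | cons x xs ih =>
    intro i dq s best hdrop hle hinv
    obtain ⟨hs, hlast, hpw, hcontent, hcover, hbest⟩ := hinv
    have hx : nums[i]? = some x := by
      have h0 : (nums.drop i)[0]? = some x := by rw [hdrop]; rfl
      simpa using h0
    have hilt : i < nums.length := (List.getElem?_eq_some_iff.1 hx).1
    have hpfx : pfx nums (i + 1) = pfx nums i + x := pfx_succ hx
    set dq1 := dropFront dq ((i : Int) - k) with hdq1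
    have hpw1 : dq1.Pairwise incr := dropFront_pairwise hpw
    have hlmem : ((i : Int) - 1, pfx nums i) ∈ dq := List.mem_of_getLast? hlast
    have hlmem1 : ((i : Int) - 1, pfx nums i) ∈ dq1 := dropFront_mem hlmem (by simp; omega)
    obtain ⟨q, t, hqt⟩ : ∃ q t, dq1 = q :: t := by
      cases hht : dq1 with
      | nil => rw [hht] at hlmem1; simp at hlmem1
      | cons a b => exact ⟨a, b, rfl⟩
    have hq_in : q ∈ dq := dropFront_subset (by rw [← hdq1, hqt]; simp)
    obtain ⟨hq1, hq2, hq3⟩ := hcontent q hq_in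
    have hqb : (i : Int) - k ≤ q.1 := dropFront_head (hdq1.symm.trans hqt)
    have hq2_mem_w : q.2 ∈ wlist nums k i := by
      rw [hq3]
      refine List.mem_map_of_mem (List.mem_range'_1.2 ⟨?_, ?_⟩) <;> simp only [winLo] <;> omega
    have hmin_le : ∀ v ∈ wlist nums k i, q.2 ≤ v := by
      intro v hv
      obtain ⟨tn, htn, rfl⟩ := List.mem_map.1 hv
      have htn' := List.mem_range'_1.1 htn
      simp only [winLo] at htn'
      obtain ⟨p, hpmem, hple, hpval⟩ := hcover ((tn : Int) - 1) (by omega) (by omega) (by omega)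
      have he : (((tn : Int) - 1) + 1).toNat = tn := by omega
      rw [he] at hpval
      have hpmem1 : p ∈ q :: t := by
        rw [← hqt]
        exact dropFront_mem hpmem (by omega)
      exact le_trans (headB_min (hqt ▸ hpw1) hpmem1) hpval
    have hmin : PySem.List.min? (wlist nums k i) (fun v => v) = some q.2 := by
      cases hm : PySem.List.min? (wlist nums k i) (fun v => v) with
      | none =>
        rw [PySem.List.min?_eq_none_iff] at hm
        rw [hm] at hq2_mem_w; simp at hq2_mem_w
      | some m =>
        have hmem := PySem.List.min?_mem hm
        have hle1 := PySem.List.min?_isMin hm q.2 hq2_mem_w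
        exact congrArg some (le_antisymm hle1 (hmin_le m hmem))
    have hwq : wmin nums k i = q.2 := by rw [wmin, hmin]; rfl
    have hdrop' : nums.drop (i + 1) = xs := by
      rw [← List.tail_drop, hdrop]; rfl
    have hcand : s + x - q.2 = candSpec nums k i := by
      rw [candSpec, hwq, hpfx, hs]
    simp only [bLoop, ← hdq1, hqt, List.headD]
    have hcast : (i : Int) + 1 = ((i + 1 : Nat) : Int) := by push_cast; ring
    rw [hcast]
    apply ih (i + 1) _ _ _ hdrop' (by omega)
    have hpfx' : s + x = pfx nums (i + 1) := by rw [hpfx, hs]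
    refine ⟨hpfx', ?_, ?_, ?_, ?_, ?_⟩
    · have hc2 : ((i + 1 : Nat) : Int) - 1 = (i : Int) := by push_cast; ring
      simp [hc2, hpfx']
    · rw [List.pairwise_append]
      refine ⟨popBack_pairwise (hqt ▸ hpw1), by simp, ?_⟩
      intro p hp p' hp'
      simp only [List.mem_singleton] at hp'
      subst hp'
      have hpin : p ∈ q :: t := popBack_subset hp
      have hlt2 : p.2 < s + x := popBack_lt (hqt ▸ hpw1) hp
      have hpd : p ∈ dq := dropFront_subset (hqt ▸ hpin)
      exact ⟨by have := (hcontent p hpd).2.1; simpa using this, by simpa using hlt2⟩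
    · intro p hp
      rcases List.mem_append.1 hp with h1 | h1
      · have hpd : p ∈ dq := dropFront_subset (hqt ▸ popBack_subset h1)
        obtain ⟨a1, a2, a3⟩ := hcontent p hpd
        exact ⟨a1, by push_cast; omega, a3⟩
      · simp only [List.mem_singleton] at h1
        subst h1
        refine ⟨by simp, by push_cast; omega, ?_⟩
        have he : (((i : Nat) : Int) + 1).toNat = i + 1 := by omega
        simp only [he]
        exact hpfx'
    · intro t' h1 h2 h3
      push_cast at h1 h3
      by_cases ht' : t' = (i : Int)
      · subst ht'
        refine ⟨(((i : Nat) : Int), s + x), by simp, le_refl _, ?_⟩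
        have he : (((i : Nat) : Int) + 1).toNat = i + 1 := by omega
        rw [he, hpfx']
      · obtain ⟨p, hpmem, hple, hpval⟩ := hcover t' (by omega) h2 (by omega)
        have hpmem1 : p ∈ q :: t := by
          rw [← hqt]
          exact dropFront_mem hpmem (by omega)
        rcases popBack_cases (s := s + x) hpmem1 with hin | hge
        · exact ⟨p, List.mem_append.2 (Or.inl hin), hple, hpval⟩
        · refine ⟨(((i : Nat) : Int), s + x), by simp, by omega, ?_⟩
          exact le_trans hge hpval
    · rw [hbest]
      cases hbs : bestSpec nums k i with
      | none => simp [bestSpec, hbs, hcand]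
      | some b =>
        simp only [bestSpec, hbs]
        rw [hcand]
        congr 1
        rcases le_total b (candSpec nums k i) with h | h
        · rw [max_eq_right h]
          split_ifs with hb
          · rfl
          · omega
        · rw [max_eq_left h]
          split_ifs with hb
          · omega
          · rfl

lemma B_eq {nums : List Int} {k : Int} (hk : 1 ≤ k) :
    find_maximal_subarray_sum_alt nums k = (bestSpec nums k nums.length).getD 0 := by
  have hinv : InvB nums k 0 [(-1, 0)] 0 none := by
    refine ⟨rfl, by simp [pfx], by simp, ?_, ?_, rfl⟩
    · intro p hp
      simp only [List.mem_singleton] at hp; subst hp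
      exact ⟨by norm_num, by norm_num, by simp [pfx]⟩
    · intro t h1 h2 h3
      have ht : t = -1 := by omega
      subst ht
      exact ⟨(-1, 0), by simp, le_refl _, by simp [pfx]⟩
  have h0 := bLoop_inv hk nums 0 [(-1, 0)] 0 none rfl (by omega) hinv
  norm_num at h0
  rw [find_maximal_subarray_sum_alt, h0]

-- ===== VERDICT (by name: the statement is the Claim_ definition above) =====
theorem find_maximal_subarray_sum_spec : Claim_equal_find_maximal_subarray_sum := by
  intro nums k _ hpre
  unfold Spec_find_maximal_subarray_sum
  rw [A_eq hpre.2, B_eq hpre.2]
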